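-- pv_equiv track=rewrite | github.com/wangjifei1201/mini-openclaw | backend/graph/coordinator.py | _parse_task_file
-- ===== SOURCE A (Python) =====
-- from typing import Any, Dict, List, Optional
--
-- def _parse_task_file(content: str) -> Optional[Dict[str, Any]]:
--     """解析任务文件"""
--     try:
--         lines = content.split("\n")
--         frontmatter = {}
--         in_frontmatter = False
--         body_lines = []
--
--         for line in lines:
--             if line == "---":
--                 in_frontmatter = not in_frontmatter
--                 continue
--             if in_frontmatter and ":" in line:
--                 key, value = line.split(":", 1)
--                 frontmatter[key.strip()] = value.strip()
--             elif not in_frontmatter: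
--                 body_lines.append(line)
--
--         return {
--             "task_id": frontmatter.get("task_id"),
--             "status": frontmatter.get("status"),
--             "target_agent": frontmatter.get("target_agent"),
--             "task_type": frontmatter.get("task_type"),
--             "parent_task": frontmatter.get("parent_task"),
--             "created_at": frontmatter.get("created_at"),
--             "updated_at": frontmatter.get("updated_at"),
--             "content": "\n".join(body_lines).strip(),
--         }
--     except Exception:
--         return None
-- ===== SOURCE B (Python) =====
-- def _parse_task_file(content):
--     """Parse frontmatter and body by splitting lines into '---'-delimited groups and using group parity."""
--     try:
--         groups = []
--         current = []
--         for line in content.split("\n"):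
--             if line == "---":
--                 groups.append(current)
--                 current = []
--             else:
--                 current.append(line)
--         groups.append(current)
--         frontmatter = {}
--         body_lines = []
--         for i, group in enumerate(groups):
--             if i % 2 == 0:
--                 body_lines.extend(group)
--             else:
--                 for line in group:
--                     if ":" in line:
--                         key, value = line.split(":", 1)
--                         frontmatter[key.strip()] = value.strip()
--         return {
--             "task_id": frontmatter.get("task_id"),
--             "status": frontmatter.get("status"),
--             "target_agent": frontmatter.get("target_agent"),
--             "task_type": frontmatter.get("task_type"),
--             "parent_task": frontmatter.get("parent_task"),
--             "created_at": frontmatter.get("created_at"),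
--             "updated_at": frontmatter.get("updated_at"),
--             "content": "\n".join(body_lines).strip(),
--         }
--     except Exception:
--         return None
-- ===== Notes on version B (the rewrite author's own statement) =====
-- stated objective: alternative
-- what changed: Replaces A's single stateful pass (toggling an in_frontmatter flag per line) by a two-phase decomposition: first split the lines into delimiter-separated groups, then merge groups by index parity (even = body, odd = frontmatter).
import Mathlib
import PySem

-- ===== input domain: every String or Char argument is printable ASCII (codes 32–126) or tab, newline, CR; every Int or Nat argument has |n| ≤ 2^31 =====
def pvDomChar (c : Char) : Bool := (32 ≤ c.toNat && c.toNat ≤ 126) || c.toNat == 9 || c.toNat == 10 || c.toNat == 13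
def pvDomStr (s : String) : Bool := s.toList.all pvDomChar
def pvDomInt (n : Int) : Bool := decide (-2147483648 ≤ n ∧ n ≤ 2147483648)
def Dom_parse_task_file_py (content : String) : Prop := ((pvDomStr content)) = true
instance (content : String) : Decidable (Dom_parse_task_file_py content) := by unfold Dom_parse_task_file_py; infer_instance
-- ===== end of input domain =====

-- B re-decomposes A's single flag-toggling pass into: split the lines into '---'-delimited groups,
-- then merge groups by index parity (even = body, odd = frontmatter); same cost, alternative structure.

-- ===== PORT A =====
-- A's loop body: state (frontmatter, in_frontmatter, body_lines)
def pvAStep (s : PySem.Dict String String × Bool × List String) (line : String) :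
    PySem.Dict String String × Bool × List String :=
  match s with
  | (fm, infm, body) =>
    if line = "---" then (fm, !infm, body)
    else if infm && PySem.Str.isIn ":" line then
      -- line.split(":", 1); the ':'-membership guard guarantees two pieces, so the '_' arm is unreachable
      match (PySem.Str.splitMax? line ":" 1).getD [] with
      | k :: v :: _ => (fm.insert (PySem.Str.strip k) (PySem.Str.strip v), infm, body)
      | _ => (fm, infm, body)
    else if !infm then (fm, infm, body ++ [line])
    else (fm, infm, body)

def parse_task_file_py (content : String) : Option (List (String × Option String)) :=
  let lines := (PySem.Str.split? content "\n").getD []   -- sep ≠ "" so split? is always some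
  let st := lines.foldl pvAStep (PySem.Dict.empty, false, [])
  some [("task_id", st.1.get? "task_id"), ("status", st.1.get? "status"),
        ("target_agent", st.1.get? "target_agent"), ("task_type", st.1.get? "task_type"),
        ("parent_task", st.1.get? "parent_task"), ("created_at", st.1.get? "created_at"),
        ("updated_at", st.1.get? "updated_at"),
        ("content", some (PySem.Str.strip (PySem.Str.join "\n" st.2.2)))]

-- ===== PORT B =====
-- grouping loop: state (finished groups, current group); '---' closes the current group
def pvGStep (s : List (List String) × List String) (line : String) :
    List (List String) × List String :=
  match s with
  | (done, cur) =>
    if line = "---" then (done ++ [cur], [])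
    else (done, cur ++ [line])

-- frontmatter line: if ':' in line, split(':',1) and insert stripped key/value (the '_' arm is unreachable)
def pvFmLine (fm : PySem.Dict String String) (line : String) : PySem.Dict String String :=
  if PySem.Str.isIn ":" line then
    match (PySem.Str.splitMax? line ":" 1).getD [] with
    | k :: v :: _ => fm.insert (PySem.Str.strip k) (PySem.Str.strip v)
    | _ => fm
  else fm

-- group-merging loop over enumerate(groups): even index extends body, odd index feeds frontmatter
def pvBStep (s : PySem.Dict String String × List String) (p : Int × List String) :
    PySem.Dict String String × List String :=
  match s, p with
  | (fm, body), (i, g) =>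
    if PySem.Int.mod i 2 = 0 then (fm, body ++ g) else (g.foldl pvFmLine fm, body)

def parse_task_file_py_alt (content : String) : Option (List (String × Option String)) :=
  let lines := (PySem.Str.split? content "\n").getD []   -- sep ≠ "" so split? is always some
  let gst := lines.foldl pvGStep ([], [])
  let groups := gst.1 ++ [gst.2]
  let st := (PySem.List.enumerate groups).foldl pvBStep (PySem.Dict.empty, [])
  some [("task_id", st.1.get? "task_id"), ("status", st.1.get? "status"),
        ("target_agent", st.1.get? "target_agent"), ("task_type", st.1.get? "task_type"),
        ("parent_task", st.1.get? "parent_task"), ("created_at", st.1.get? "created_at"),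
        ("updated_at", st.1.get? "updated_at"),
        ("content", some (PySem.Str.strip (PySem.Str.join "\n" st.2)))]

-- ===== PRECONDITION & SPEC =====
def Spec_parse_task_file_py (content : String) (out : Option (List (String × Option String))) : Prop := out = parse_task_file_py_alt content
instance (content : String) (out : Option (List (String × Option String))) : Decidable (Spec_parse_task_file_py content out) := by unfold Spec_parse_task_file_py; infer_instance

-- ===== CLAIM (what is proved, stated in full; the proofs are below) =====
def Claim_equal_parse_task_file_py : Prop := ∀ (content : String), Dom_parse_task_file_py content → Spec_parse_task_file_py content (parse_task_file_py content)

-- ===== LEMMAS AND PROOFS =====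

-- the grouping B computes, as a structural recursion (proof-side model)
def pvGroups : List String → List (List String)
  | [] => [[]]
  | l :: ls =>
    if l = "---" then [] :: pvGroups ls
    else match pvGroups ls with
      | g :: gs => (l :: g) :: gs
      | [] => [[l]]

def pvConsHead (c : List String) : List (List String) → List (List String)
  | [] => [c]
  | g :: gs => (c ++ g) :: gs

-- B's group-merging, as a parity-alternating recursion (false = body group)
def pvBProc : List (List String) → Bool → PySem.Dict String String → List String →
    PySem.Dict String String × List String
  | [], _, fm, body => (fm, body)
  | g :: gs, p, fm, body =>
    if p then pvBProc gs (!p) (g.foldl pvFmLine fm) body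
    else pvBProc gs (!p) fm (body ++ g)

theorem pvGroups_cons (ls : List String) : ∃ g gs, pvGroups ls = g :: gs := by
  cases ls with
  | nil => exact ⟨[], [], rfl⟩
  | cons l ls =>
    simp only [pvGroups]
    split
    · exact ⟨_, _, rfl⟩
    · split
      · exact ⟨_, _, rfl⟩
      · exact ⟨_, _, rfl⟩

theorem pvGStep_groups (lines : List String) (done : List (List String)) (cur : List String) :
    (List.foldl pvGStep (done, cur) lines).1 ++ [(List.foldl pvGStep (done, cur) lines).2] =
      done ++ pvConsHead cur (pvGroups lines) := by
  induction lines generalizing done cur with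
  | nil => simp [pvGroups, pvConsHead]
  | cons l ls ih =>
    obtain ⟨g, gs, hg⟩ := pvGroups_cons ls
    by_cases h : l = "---"
    · have hs : pvGStep (done, cur) l = (done ++ [cur], []) := by simp [pvGStep, h]
      simp only [List.foldl_cons, hs, ih]
      simp [pvGroups, h, hg, pvConsHead]
    · have hs : pvGStep (done, cur) l = (done, cur ++ [l]) := by simp [pvGStep, h]
      simp only [List.foldl_cons, hs, ih]
      simp [pvGroups, h, hg, pvConsHead]

theorem pvGStep_groups_nil (lines : List String) :
    (List.foldl pvGStep ([], []) lines).1 ++ [(List.foldl pvGStep ([], []) lines).2] =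
      pvGroups lines := by
  obtain ⟨g, gs, hg⟩ := pvGroups_cons lines
  rw [pvGStep_groups, hg]
  simp [pvConsHead]

theorem pvParity (n : Nat) : PySem.Int.mod (n : Int) 2 = ((n % 2 : Nat) : Int) := by
  rw [PySem.Int.mod_eq_emod_of_pos (by norm_num)]; omega

theorem pvEnumFold (gs : List (List String)) (n : Nat) (fm : PySem.Dict String String)
    (body : List String) :
    List.foldl pvBStep (fm, body) (PySem.List.enumerate gs (n : Int)) =
      pvBProc gs (n % 2 == 1) fm body := by
  induction gs generalizing n fm body with
  | nil => simp [PySem.List.enumerate_nil, pvBProc]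
  | cons g gs ih =>
    rw [PySem.List.enumerate_cons]
    have hcast : ((n : Int) + 1) = ((n + 1 : Nat) : Int) := by push_cast; ring
    by_cases h : n % 2 = 0
    · have hm : PySem.Int.mod ((n : Nat) : Int) 2 = 0 := by rw [pvParity]; simp [h]
      have hs : pvBStep (fm, body) ((n : Int), g) = (fm, body ++ g) := by
        simp only [pvBStep]; rw [if_pos hm]
      have h2 : (n + 1) % 2 = 1 := by omega
      have hp : (n % 2 == 1) = false := by simp [h]
      have hpar : ((n + 1) % 2 == 1) = true := by simp [h2]
      simp only [List.foldl_cons, hs, hcast, ih (n + 1) fm (body ++ g)]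
      rw [hpar, hp]
      simp [pvBProc]
    · have h1 : n % 2 = 1 := by omega
      have hm : ¬ PySem.Int.mod ((n : Nat) : Int) 2 = 0 := by rw [pvParity]; simp [h1]
      have hs : pvBStep (fm, body) ((n : Int), g) = (g.foldl pvFmLine fm, body) := by
        simp only [pvBStep]; rw [if_neg hm]
      have h2 : (n + 1) % 2 = 0 := by omega
      have hp : (n % 2 == 1) = true := by simp [h1]
      have hpar : ((n + 1) % 2 == 1) = false := by simp [h2]
      simp only [List.foldl_cons, hs, hcast, ih (n + 1) (g.foldl pvFmLine fm) body]
      rw [hpar, hp]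
      simp [pvBProc]

theorem pvAStep_fm (fm : PySem.Dict String String) (body : List String) (l : String)
    (h : ¬ l = "---") : pvAStep (fm, true, body) l = (pvFmLine fm l, true, body) := by
  simp only [pvAStep, pvFmLine, if_neg h, Bool.true_and]
  split
  · split <;> rfl
  · rfl

theorem pvMain (lines : List String) (fm : PySem.Dict String String) (p : Bool)
    (body : List String) :
    ∃ q, List.foldl pvAStep (fm, p, body) lines =
      ((pvBProc (pvGroups lines) p fm body).1, q, (pvBProc (pvGroups lines) p fm body).2) := by
  induction lines generalizing fm p body with
  | nil => exact ⟨p, by cases p <;> simp [pvGroups, pvBProc]⟩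
  | cons l ls ih =>
    by_cases h : l = "---"
    · have hs : pvAStep (fm, p, body) l = (fm, !p, body) := by simp [pvAStep, h]
      have hgr : pvGroups (l :: ls) = [] :: pvGroups ls := by simp [pvGroups, h]
      have hb : pvBProc ([] :: pvGroups ls) p fm body = pvBProc (pvGroups ls) (!p) fm body := by
        cases p <;> simp [pvBProc]
      simp only [List.foldl_cons, hs, hgr, hb]
      exact ih fm (!p) body
    · obtain ⟨g, gs, hg⟩ := pvGroups_cons ls
      have hgr : pvGroups (l :: ls) = (l :: g) :: gs := by simp [pvGroups, h, hg]
      cases p with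
      | true =>
        have hs := pvAStep_fm fm body l h
        have hb : pvBProc ((l :: g) :: gs) true fm body =
            pvBProc (g :: gs) true (pvFmLine fm l) body := by
          simp [pvBProc, List.foldl_cons]
        simp only [List.foldl_cons, hs, hgr, hb, ← hg]
        exact ih (pvFmLine fm l) true body
      | false =>
        have hs : pvAStep (fm, false, body) l = (fm, false, body ++ [l]) := by
          simp [pvAStep, h]
        have hb : pvBProc ((l :: g) :: gs) false fm body =
            pvBProc (g :: gs) false fm (body ++ [l]) := by
          simp [pvBProc, List.append_assoc]
        simp only [List.foldl_cons, hs, hgr, hb, ← hg]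
        exact ih fm false (body ++ [l])

-- ===== VERDICT (by name: the statement is the Claim_ definition above) =====
theorem parse_task_file_py_spec : Claim_equal_parse_task_file_py := by
  intro content _
  unfold Spec_parse_task_file_py parse_task_file_py parse_task_file_py_alt
  simp only []
  obtain ⟨q, hM⟩ := pvMain ((PySem.Str.split? content "\n").getD []) PySem.Dict.empty false []
  have hE := pvEnumFold (pvGroups ((PySem.Str.split? content "\n").getD [])) 0
      PySem.Dict.empty []
  have h0 : PySem.List.enumerate
      ((List.foldl pvGStep ([], []) ((PySem.Str.split? content "\n").getD [])).1 ++
        [(List.foldl pvGStep ([], []) ((PySem.Str.split? content "\n").getD [])).2]) ((0 : Nat) : Int) =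
      PySem.List.enumerate (pvGroups ((PySem.Str.split? content "\n").getD [])) ((0 : Nat) : Int) := by
    rw [pvGStep_groups_nil]
  have h00 : ((0 : Nat) : Int) = (0 : Int) := by norm_num
  rw [h00] at h0 hE
  rw [hM, h0, hE]
  rfl
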